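-- pv_equiv track=rewrite | github.com/Vergil0327/leetcode-history | Sorting/3886. Sum of Sortable Integers/solution.py | sortableIntegers
-- ===== SOURCE A (Python) =====
-- def sortableIntegers(nums: list[int]) -> int:
--     n = len(nums)
--     target = sorted(nums)
--
--     res = 0
--     for k in range(1, n + 1):
--         if n % k != 0: continue
--
--         is_valid = True
--         for i in range(0, n, k):
--             sub = nums[i : i + k]
--             t_sub = target[i : i + k]
--
--             # 1. Check if the elements are the same
--             if sorted(sub) != t_sub:
--                 is_valid = False
--                 break
--
--             # 2. Check if sub is a cyclic shift of t_sub
--             # A cyclic shift of a sorted array has at most one "pivot"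
--             # where the next element is smaller than the current.
--             inflections = 0
--             for j in range(k):
--                 if sub[j] > sub[(j + 1) % k]:
--                     inflections += 1
--
--             # A sorted array rotated can have at most 1 inflection point.
--             # Special case: if all elements are same, inflections = 0.
--             if inflections > 1:
--                 is_valid = False
--                 break
--
--         if is_valid:
--             res += k
--
--     return res
-- ===== SOURCE B (Python) =====
-- def sortableIntegers(nums: list[int]) -> int:
--     n = len(nums)
--     target = sorted(nums)
--
--     def block_ok(i: int, k: int) -> bool:
--         seg = target[i:i + k]          # already sorted, since target is sorted
--         sub = nums[i:i + k]
--         ds = [j for j in range(1, k) if sub[j - 1] > sub[j]]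
--         if len(ds) > 1:
--             return False               # more than one descent: not a rotation of a sorted list
--         if not ds:
--             return sub == seg          # sub is sorted: it must equal the segment itself
--         p = ds[0]                      # single descent at p forces the rotation offset
--         return sub == seg[k - p:] + seg[:k - p]
--
--     return sum(k for k in range(1, n + 1)
--                if n % k == 0 and all(block_ok(i, k) for i in range(0, n, k)))
-- ===== Notes on version B (the rewrite author's own statement) =====
-- stated objective: alternative
-- what changed: Per block, A sorts the block and compares it to the target segment, then counts cyclic inflection points (with wrap-around) in a second pass; B never sorts the block: it collects the linear descent positions, which force the unique candidate rotation of the already-sorted target segment, and does a single equality comparison against that rotation; the outer flag/break loop becomes a filter-and-sum comprehension.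
import Mathlib
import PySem

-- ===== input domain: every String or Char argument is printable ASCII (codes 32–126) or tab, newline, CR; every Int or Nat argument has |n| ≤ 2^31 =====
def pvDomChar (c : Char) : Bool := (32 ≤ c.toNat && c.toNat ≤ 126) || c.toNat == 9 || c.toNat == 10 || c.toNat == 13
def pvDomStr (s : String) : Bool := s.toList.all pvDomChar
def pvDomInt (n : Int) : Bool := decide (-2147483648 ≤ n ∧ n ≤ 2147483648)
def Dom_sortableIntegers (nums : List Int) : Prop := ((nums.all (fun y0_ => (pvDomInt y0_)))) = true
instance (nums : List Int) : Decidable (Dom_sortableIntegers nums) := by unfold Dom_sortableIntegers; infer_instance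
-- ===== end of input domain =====

-- B replaces A's per-block two-pass check (sort the block + count cyclic inflections with wrap-around)
-- by locating the linear descent positions, which force the unique candidate rotation of the already
-- sorted target segment, and doing one equality comparison; the flag/break outer loop becomes a
-- filter-and-sum. Objective: alternative (no per-block sort; not measurably faster in a timing run).

-- ===== PORT A =====
def sortableIntegers (nums : List Int) : Int :=
  let n : Int := (nums.length : Int)
  let target := PySem.List.sorted nums (fun x => x)
  (PySem.List.pyRange 1 (n + 1) 1).foldl (fun res k =>
    if PySem.Int.mod n k ≠ 0 then res
    else
      -- inner loop with is_valid flag and break: once false it stays false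
      let is_valid := (PySem.List.pyRange 0 n k).foldl (fun valid i =>
        if valid then
          let sub := PySem.List.slice nums (some i) (some (i + k))
          let t_sub := PySem.List.slice target (some i) (some (i + k))
          if PySem.List.sorted sub (fun x => x) ≠ t_sub then false
          else
            -- sub[j] and sub[(j+1) % k]: both indices are always in range here, so pyGetD is exact
            let inflections := (PySem.List.pyRange 0 k 1).foldl (fun inf j =>
              if PySem.List.pyGetD sub j 0 > PySem.List.pyGetD sub (PySem.Int.mod (j + 1) k) 0
              then inf + 1 else inf) (0 : Int)
            if inflections > 1 then false else true
        else valid) true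
      if is_valid then res + k else res) 0

-- ===== PORT B =====
-- port of Source B's nested helper block_ok (closes over nums and target, passed explicitly)
def pvAltBlockOk (nums target : List Int) (i k : Int) : Bool :=
  let seg := PySem.List.slice target (some i) (some (i + k))
  let sub := PySem.List.slice nums (some i) (some (i + k))
  let ds := (PySem.List.pyRange 1 k 1).filter (fun j =>
    decide (PySem.List.pyGetD sub (j - 1) 0 > PySem.List.pyGetD sub j 0))
  if ds.length > 1 then false
  else if ds.isEmpty then sub == seg
  else
    let p := PySem.List.pyGetD ds 0 0
    sub == PySem.List.slice seg (some (k - p)) none ++ PySem.List.slice seg none (some (k - p))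

def sortableIntegers_alt (nums : List Int) : Int :=
  let n : Int := (nums.length : Int)
  let target := PySem.List.sorted nums (fun x => x)
  ((PySem.List.pyRange 1 (n + 1) 1).filter (fun k =>
      PySem.Int.mod n k == 0 &&
        (PySem.List.pyRange 0 n k).all (fun i => pvAltBlockOk nums target i k))).sum

-- ===== PRECONDITION & SPEC =====
def Spec_sortableIntegers (nums : List Int) (out : Int) : Prop := out = sortableIntegers_alt nums
instance (nums : List Int) (out : Int) : Decidable (Spec_sortableIntegers nums out) := by unfold Spec_sortableIntegers; infer_instance

-- ===== CLAIM (what is proved, stated in full; the proofs are below) =====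
def Claim_equal_sortableIntegers : Prop := ∀ (nums : List Int), Dom_sortableIntegers nums → Spec_sortableIntegers nums (sortableIntegers nums)

-- ===== LEMMAS AND PROOFS =====

-- number of strict descents between consecutive elements
def pvDesc : List Int → Nat
  | a :: b :: t => (if b < a then 1 else 0) + pvDesc (b :: t)
  | _ => 0

-- the wrap-around descent bit (last element strictly greater than the first)
def pvWrap (l : List Int) : Nat := if l.getD 0 0 < l.getD (l.length - 1) 0 then 1 else 0

theorem pvDesc_eq_zero_iff (l : List Int) : pvDesc l = 0 ↔ l.Pairwise (· ≤ ·) := by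
  have h : pvDesc l = 0 ↔ l.IsChain (· ≤ ·) := by
    induction l with
    | nil => simp [pvDesc]
    | cons a t ih =>
      cases t with
      | nil => simp [pvDesc]
      | cons b t' =>
        rw [List.isChain_cons_cons, pvDesc]
        constructor
        · intro h; constructor
          · by_contra hba; simp [not_le] at hba; simp [hba] at h
          · exact ih.mp (by omega)
        · rintro ⟨hab, hc⟩
          have := ih.mpr hc
          simp [not_lt.mpr hab, this]
  rw [h, List.isChain_iff_pairwise]

theorem pvDesc_append_le_one (u v : List Int) (hu : u.Pairwise (· ≤ ·)) (hv : v.Pairwise (· ≤ ·)) :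
    pvDesc (u ++ v) ≤ 1 := by
  induction u with
  | nil =>
    have := (pvDesc_eq_zero_iff v).mpr hv
    rw [List.nil_append, (pvDesc_eq_zero_iff v).mpr hv]
    omega
  | cons a u' ih =>
    cases u' with
    | nil =>
      cases v with
      | nil => simp [pvDesc]
      | cons b t =>
        simp only [List.singleton_append, pvDesc]
        have : pvDesc (b :: t) = 0 := (pvDesc_eq_zero_iff _).mpr hv
        split <;> omega
    | cons b u'' =>
      have hab : a ≤ b := (List.pairwise_cons.mp hu).1 b (by simp)
      have := ih (List.pairwise_cons.mp hu).2
      simp only [List.cons_append, pvDesc] at this ⊢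
      rw [if_neg (not_lt.mpr hab)]
      omega

theorem pvDesc_eq_one_split (l : List Int) (h : pvDesc l = 1) :
    ∃ u v, l = u ++ v ∧ u ≠ [] ∧ v ≠ [] ∧ u.Pairwise (· ≤ ·) ∧ v.Pairwise (· ≤ ·) := by
  induction l with
  | nil => simp [pvDesc] at h
  | cons a t ih =>
    cases t with
    | nil => simp [pvDesc] at h
    | cons b t' =>
      rw [pvDesc] at h
      by_cases hba : b < a
      · refine ⟨[a], b :: t', rfl, by simp, by simp, by simp, ?_⟩
        rw [if_pos hba] at h
        exact (pvDesc_eq_zero_iff _).mp (by omega)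
      · rw [if_neg hba] at h
        obtain ⟨u, v, heq, hu0, hv0, hupw, hvpw⟩ := ih (by omega)
        cases u with
        | nil => exact absurd rfl hu0
        | cons c u'' =>
          have hcb : b = c := by
            have h2 := heq; simp only [List.cons_append, List.cons.injEq] at h2
            exact h2.1
          subst hcb
          refine ⟨a :: b :: u'', v, by simpa using heq, by simp, hv0, ?_, hvpw⟩
          rw [List.pairwise_cons]
          refine ⟨?_, hupw⟩
          intro x hx
          rcases List.mem_cons.mp hx with rfl | hx
          · exact not_lt.mp hba
          · exact le_trans (not_lt.mp hba) ((List.pairwise_cons.mp hupw).1 x hx)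

theorem pv_pairwise_head_le (a : Int) (t : List Int) (h : (a :: t).Pairwise (· ≤ ·)) :
    ∀ x ∈ a :: t, a ≤ x := by
  intro x hx
  rcases List.mem_cons.mp hx with rfl | hx
  · exact le_refl x
  · exact (List.pairwise_cons.mp h).1 x hx

theorem pv_pairwise_le_getLast (l : List Int) (h : l.Pairwise (· ≤ ·)) (hne : l ≠ []) :
    ∀ x ∈ l, x ≤ l.getLast hne := by
  induction l with
  | nil => simp at hne
  | cons a t ih =>
    intro x hx
    cases t with
    | nil => simp at hx; simp [hx, List.getLast]
    | cons b t' =>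
      rw [List.getLast_cons (by simp)]
      rcases List.mem_cons.mp hx with rfl | hx
      · exact le_trans ((List.pairwise_cons.mp h).1 _ (List.getLast_mem _)) (le_refl _)
      · exact ih (List.pairwise_cons.mp h).2 (by simp) x hx

theorem pv_window (t : List Int) (r : Nat) (hr : r ≤ t.length) :
    ((t ++ t).drop r).take t.length = t.drop r ++ t.take r := by
  rw [List.drop_append_of_le_length hr, List.take_append]
  congr 2
  · exact List.take_of_length_le (by simp)
  · simp; omega

theorem pvBlockIff (sub t : List Int) (hpw : t.Pairwise (· ≤ ·)) (hlen : sub.length = t.length)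
    (hpos : sub ≠ []) :
    ((PySem.List.sorted sub (fun x => x)) = t ∧ pvDesc sub + pvWrap sub ≤ 1) ↔
      ∃ r : Nat, r < sub.length ∧ ((t ++ t).drop r).take sub.length = sub := by
  constructor
  · rintro ⟨hsort, hinfl⟩
    have hperm : t.Perm sub := hsort ▸ PySem.List.sorted_perm sub (fun x => x) false
    match hd : pvDesc sub with
    | 0 =>
      have hsubpw : sub.Pairwise (· ≤ ·) := (pvDesc_eq_zero_iff sub).mp hd
      have : PySem.List.sorted sub (fun x => x) = sub :=
        PySem.List.sorted_eq_self_of_pairwise sub (fun x => x) hsubpw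
      refine ⟨0, List.length_pos_iff.mpr hpos, ?_⟩
      rw [List.drop_zero, hlen, List.take_left, ← hsort, this]
    | 1 =>
      have hwrap : pvWrap sub = 0 := by omega
      obtain ⟨u, v, rfl, hu0, hv0, hupw, hvpw⟩ := pvDesc_eq_one_split sub hd
      -- wrap = 0 means last (u++v) ≤ head (u++v), i.e. v.last ≤ u.head
      have hlast_le : (u ++ v).getLast (by simp [hv0]) ≤ (u ++ v).head (by simp [hu0]) := by
        by_contra hlt
        have hne : u ++ v ≠ [] := by simp [hu0]
        have hlp : 0 < (u ++ v).length := List.length_pos_iff.mpr hne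
        have h1 : (u ++ v).getD 0 0 = (u ++ v).head hne := by
          rw [List.getD_eq_getElem _ _ hlp, List.head_eq_getElem]
        have h2 : (u ++ v).getD ((u ++ v).length - 1) 0 = (u ++ v).getLast hne := by
          rw [List.getD_eq_getElem _ _ (by omega), List.getLast_eq_getElem]
        unfold pvWrap at hwrap
        rw [h1, h2, if_pos (not_le.mp hlt)] at hwrap
        omega
      have hjunc : ∀ a ∈ v, ∀ b ∈ u, a ≤ b := by
        intro a ha b hb
        have h1 : a ≤ v.getLast hv0 := pv_pairwise_le_getLast v hvpw hv0 a ha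
        have h2 : (u ++ v).getLast (by simp [hv0]) = v.getLast hv0 := List.getLast_append_of_ne_nil _ hv0
        have h3 : (u ++ v).head (by simp [hu0]) = u.head hu0 := List.head_append_left hu0
        have h4 : u.head hu0 ≤ b := by
          obtain ⟨c, u', rfl⟩ := List.exists_cons_of_ne_nil hu0
          exact pv_pairwise_head_le c u' hupw b hb
        calc a ≤ v.getLast hv0 := h1
          _ = (u ++ v).getLast _ := h2.symm
          _ ≤ (u ++ v).head _ := hlast_le
          _ = u.head hu0 := h3
          _ ≤ b := h4
      have hvu_pw : (v ++ u).Pairwise (· ≤ ·) :=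
        List.pairwise_append.mpr ⟨hvpw, hupw, hjunc⟩
      have hvu_perm : (v ++ u).Perm (u ++ v) := List.perm_append_comm
      have ht_eq : t = v ++ u := by
        rw [← hsort]
        exact PySem.List.sorted_id_eq_of_perm_of_pairwise (u ++ v) (v ++ u) hvu_perm hvu_pw
      refine ⟨v.length, ?_, ?_⟩
      · have : u.length ≠ 0 := by simpa [List.length_eq_zero_iff] using hu0
        simp [List.length_append]; omega
      · rw [ht_eq]
        have : (v ++ u) ++ (v ++ u) = v ++ ((u ++ v) ++ u) := by simp [List.append_assoc]
        rw [this, List.drop_left]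
        exact List.take_left
    | (m + 2) => omega
  · rintro ⟨r, hr, hrot⟩
    have hrt : r ≤ t.length := by omega
    have hexp : ((t ++ t).drop r).take sub.length = t.drop r ++ t.take r := by
      rw [hlen]; exact pv_window t r (by omega)
    have hsub_eq : sub = t.drop r ++ t.take r := by rw [← hrot, hexp]
    have hperm : t.Perm sub := by
      rw [hsub_eq]
      have h := List.perm_append_comm (l₁ := t.take r) (l₂ := t.drop r)
      rwa [List.take_append_drop] at h
    have hsort : PySem.List.sorted sub (fun x => x) = t :=
      PySem.List.sorted_id_eq_of_perm_of_pairwise sub t hperm hpw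
    refine ⟨hsort, ?_⟩
    have hdpw : (t.drop r).Pairwise (· ≤ ·) := hpw.sublist (List.drop_sublist r t)
    have htpw : (t.take r).Pairwise (· ≤ ·) := hpw.sublist (List.take_sublist r t)
    rcases Nat.eq_zero_or_pos r with rfl | hrpos
    · have : sub = t := by simpa using hsub_eq
      have : pvDesc sub = 0 := (pvDesc_eq_zero_iff sub).mpr (this ▸ hpw)
      unfold pvWrap; split <;> omega
    · -- r > 0 : wrap = 0 and desc ≤ 1
      have hrlt : r < t.length := by omega
      have hdesc : pvDesc sub ≤ 1 := by
        rw [hsub_eq]; exact pvDesc_append_le_one _ _ hdpw htpw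
      have hwrap : pvWrap sub = 0 := by
        have hlsub : 0 < sub.length := by omega
        have h0 : sub.getD 0 0 = t[r] := by
          rw [List.getD_eq_getElem _ _ hlsub]
          have : sub[0]'hlsub = (t.drop r ++ t.take r)[0]'(by rw [← hsub_eq]; omega) :=
            List.getElem_of_eq hsub_eq _
          rw [this, List.getElem_append_left (by simp; omega), List.getElem_drop]
          simp
        have h1 : sub.getD (sub.length - 1) 0 = t[r-1] := by
          rw [List.getD_eq_getElem _ _ (by omega)]
          have : sub[sub.length - 1]'(by omega) =
              (t.drop r ++ t.take r)[sub.length - 1]'(by rw [← hsub_eq]; omega) :=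
            List.getElem_of_eq hsub_eq _
          rw [this, List.getElem_append_right (by simp; omega)]
          rw [List.getElem_take]
          congr 1
          simp; omega
        have hmono : t[r-1] ≤ t[r] := by
          exact List.pairwise_iff_getElem.mp hpw (r-1) r (by omega) (by omega) (by omega)
        unfold pvWrap
        rw [h0, h1, if_neg (not_lt.mpr hmono)]
      omega

theorem pvCountRangeDesc (sub : List Int) :
    (List.range (sub.length - 1)).countP (fun j => decide (sub.getD (j+1) 0 < sub.getD j 0))
      = pvDesc sub := by
  induction sub with
  | nil => rfl
  | cons a t ih =>
    cases t with
    | nil => rfl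
    | cons b t' =>
      have hlen : (a :: b :: t').length - 1 = ((b :: t').length - 1) + 1 := by simp
      rw [hlen, List.range_succ_eq_map, List.countP_cons, List.countP_map]
      have hpt : ((fun j => decide ((a :: b :: t').getD (j+1) 0 < (a :: b :: t').getD j 0)) ∘ Nat.succ)
          = (fun j => decide ((b :: t').getD (j+1) 0 < (b :: t').getD j 0)) := by
        funext j
        simp [Function.comp]
      rw [hpt, ih, pvDesc]
      simp
      omega

theorem pvInflFold (sub : List Int) (k : Int) (hk : 0 < k) (hlen : sub.length = k.toNat) :
    (PySem.List.pyRange 0 k 1).foldl (fun inf j =>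
        if PySem.List.pyGetD sub j 0 > PySem.List.pyGetD sub (PySem.Int.mod (j + 1) k) 0
        then inf + 1 else inf) (0 : Int) = ((pvDesc sub + pvWrap sub : Nat) : Int) := by
  set p : Int → Bool := fun j =>
    decide (PySem.List.pyGetD sub (PySem.Int.mod (j + 1) k) 0 < PySem.List.pyGetD sub j 0) with hp
  have hcong := PySem.List.foldl_congr_mem' (PySem.List.pyRange 0 k 1)
    (fun inf j => if PySem.List.pyGetD sub j 0 > PySem.List.pyGetD sub (PySem.Int.mod (j + 1) k) 0
        then inf + 1 else inf)
    (fun inf j => if p j = true then inf + 1 else inf) (0 : Int)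
    (by intro x hx acc; simp [hp, GT.gt])
  rw [hcong, PySem.List.foldl_count_if, zero_add]
  have hsplit : PySem.List.pyRange 0 k 1 = PySem.List.pyRange 0 (k-1) 1 ++ [k-1] := by
    rw [show k = (k - 1) + 1 by omega, PySem.List.pyRange_one_succ_right (by omega)]
    norm_num
  rw [hsplit, List.countP_append]
  have hlast : (List.countP p [k-1]) = pvWrap sub := by
    have hmod : PySem.Int.mod ((k-1) + 1) k = 0 := by
      rw [show (k-1)+1 = k by omega, PySem.Int.mod_eq_emod_of_pos hk, Int.emod_self]
    have hlp : 0 < sub.length := by omega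
    have hg0 : PySem.List.pyGetD sub 0 0 = sub.getD 0 0 := PySem.List.pyGetD_zero sub 0
    have hg1 : PySem.List.pyGetD sub (k-1) 0 = sub.getD (sub.length - 1) 0 := by
      rw [PySem.List.pyGetD_eq_getElem sub 0 (by omega) (by omega),
          List.getD_eq_getElem _ _ (by omega)]
      congr 1
      omega
    simp only [List.countP_cons, List.countP_nil, hp, hmod, hg0, hg1]
    unfold pvWrap
    split <;> simp_all
  have hmain : (PySem.List.pyRange 0 (k-1) 1).countP p = pvDesc sub := by
    rw [PySem.List.pyRange_one, List.countP_map, show ((k-1) - 0).toNat = sub.length - 1 by omega]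
    calc (List.range (sub.length - 1)).countP (p ∘ fun (j : Nat) => (0 : Int) + ↑j)
        = (List.range (sub.length - 1)).countP
            (fun j => decide (sub.getD (j+1) 0 < sub.getD j 0)) := by
          refine List.countP_congr ?_
          intro j hj
          have hjk : (j : Int) + 1 < k := by
            have := List.mem_range.mp hj
            omega
          have hmod : PySem.Int.mod (((j + 1 : Nat) : Int)) k = ((j + 1 : Nat) : Int) := by
            rw [PySem.Int.mod_eq_emod_of_pos hk, Int.emod_eq_of_lt (by omega) (by push_cast; omega)]
          have e2 : ((j : Int)) + 1 = ((j + 1 : Nat) : Int) := by push_cast; ring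
          simp only [hp, Function.comp, zero_add, e2, hmod, PySem.List.pyGetD_natCast,
                     decide_eq_true_eq]
      _ = pvDesc sub := pvCountRangeDesc sub
  rw [hlast, hmain]

theorem pvFoldlBreak {α : Type} (l : List α) (p : α → Bool) :
    l.foldl (fun v i => if v then p i else v) true = l.all p := by
  have aux : ∀ m : List α, m.foldl (fun v i => if v then p i else v) false = false := by
    intro m; induction m with
    | nil => rfl
    | cons a t ih => simpa using ih
  induction l with
  | nil => rfl
  | cons a t ih =>
    simp only [List.foldl_cons, List.all_cons]
    cases h : p a with
    | true => simpa [h] using ih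
    | false => simpa [h] using aux t

theorem pv_sum_filter (l : List Int) (p : Int → Bool) :
    (l.filter p).sum = (l.map (fun x => if p x then x else 0)).sum := by
  induction l with
  | nil => rfl
  | cons a t ih => by_cases h : p a <;> simp [h, ih]

theorem pvAllCongr {α : Type} (l : List α) (p q : α → Bool) (h : ∀ x ∈ l, p x = q x) :
    l.all p = l.all q := by
  induction l with
  | nil => rfl
  | cons a t ih =>
    simp only [List.all_cons, h a (by simp)]
    rw [ih (fun x hx => h x (by simp [hx]))]

theorem pvDsLen (sub : List Int) (k : Int) (hlen : sub.length = k.toNat) :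
    ((PySem.List.pyRange 1 k 1).filter (fun j =>
      decide (PySem.List.pyGetD sub (j - 1) 0 > PySem.List.pyGetD sub j 0))).length = pvDesc sub := by
  rw [← List.countP_eq_length_filter, PySem.List.pyRange_one, List.countP_map]
  have hfun : ((fun j => decide (PySem.List.pyGetD sub (j - 1) 0 > PySem.List.pyGetD sub j 0)) ∘
      (fun (j : Nat) => (1 : Int) + ↑j)) =
      fun (j : Nat) => decide (sub.getD (j + 1) 0 < sub.getD j 0) := by
    funext j
    simp only [Function.comp]
    rw [decide_eq_decide]
    rw [show (1 : Int) + ↑j - 1 = ((j : Nat) : Int) by omega,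
        show (1 : Int) + ↑j = ((j + 1 : Nat) : Int) by push_cast; ring,
        PySem.List.pyGetD_natCast, PySem.List.pyGetD_natCast]
  rw [hfun, show (k - 1).toNat = sub.length - 1 by omega, pvCountRangeDesc]

theorem pvRotForced (seg : List Int) (hpw : seg.Pairwise (· ≤ ·)) (r p : Nat)
    (_hr0 : 0 < r) (hrk : r < seg.length) (hp1 : 1 ≤ p) (hpk : p < seg.length)
    (hlen : (seg.drop r ++ seg.take r).length = seg.length)
    (hdesc : (seg.drop r ++ seg.take r)[p]'(by omega) < (seg.drop r ++ seg.take r)[p-1]'(by omega)) :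
    p = seg.length - r := by
  by_contra hne
  have hld : (seg.drop r).length = seg.length - r := by simp
  have hmono : ∀ (a b : Nat) (ha : a < seg.length) (hb : b < seg.length), a < b → seg[a] ≤ seg[b] := by
    intro a b ha hb hab
    exact List.pairwise_iff_getElem.mp hpw a b ha hb hab
  rcases Nat.lt_or_ge p (seg.length - r) with hc | hc
  · have e1 : (seg.drop r ++ seg.take r)[p]'(by omega) = seg[r + p]'(by omega) := by
      rw [List.getElem_append_left (by omega), List.getElem_drop]
    have e2 : (seg.drop r ++ seg.take r)[p-1]'(by omega) = seg[r + (p-1)]'(by omega) := by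
      rw [List.getElem_append_left (by omega), List.getElem_drop]
    rw [e1, e2] at hdesc
    exact absurd (hmono (r + (p-1)) (r + p) (by omega) (by omega) (by omega)) (not_le.mpr hdesc)
  · have hc' : seg.length - r < p := by omega
    have e1 : (seg.drop r ++ seg.take r)[p]'(by omega) = seg[p - (seg.length - r)]'(by omega) := by
      rw [List.getElem_append_right (by omega)]
      simp [List.getElem_take, hld]
    have e2 : (seg.drop r ++ seg.take r)[p-1]'(by omega) = seg[(p-1) - (seg.length - r)]'(by omega) := by
      rw [List.getElem_append_right (by omega)]
      simp [List.getElem_take, hld]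
    rw [e1, e2] at hdesc
    exact absurd (hmono ((p-1) - (seg.length - r)) (p - (seg.length - r)) (by omega) (by omega) (by omega))
      (not_le.mpr hdesc)

theorem pvBodyEq (nums : List Int) (k i : Int) (hk : 0 < k)
    (hdvd : k ∣ (nums.length : Int)) (hi0 : 0 ≤ i) (hin : i < (nums.length : Int))
    (hidvd : k ∣ i) :
    (let sub := PySem.List.slice nums (some i) (some (i + k))
     let t_sub := PySem.List.slice (PySem.List.sorted nums (fun x => x)) (some i) (some (i + k))
     if PySem.List.sorted sub (fun x => x) ≠ t_sub then false
     else
       let inflections := (PySem.List.pyRange 0 k 1).foldl (fun inf j =>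
         if PySem.List.pyGetD sub j 0 > PySem.List.pyGetD sub (PySem.Int.mod (j + 1) k) 0
         then inf + 1 else inf) (0 : Int)
       if inflections > 1 then false else true)
    = pvAltBlockOk nums (PySem.List.sorted nums (fun x => x)) i k := by
  have hik : i + k ≤ (nums.length : Int) := by
    have h1 : k ∣ ((nums.length : Int) - i) := Int.dvd_sub hdvd hidvd
    have h2 : k ≤ (nums.length : Int) - i := Int.le_of_dvd (by omega) h1
    omega
  have htlen : (PySem.List.sorted nums (fun x => x)).length = nums.length :=
    PySem.List.length_sorted nums (fun x => x) false
  have hslice : ∀ (l : List Int), l.length = nums.length →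
      PySem.List.slice l (some i) (some (i + k)) = (l.drop i.toNat).take k.toNat ∧
      (PySem.List.slice l (some i) (some (i + k))).length = k.toNat := by
    intro l hl
    have h1 : PySem.List.slice l (some i) (some (i + k)) = (l.drop i.toNat).take ((i+k).toNat - i.toNat) :=
      PySem.List.slice_toNat l hi0 (by omega)
    have h2 : (i+k).toNat - i.toNat = k.toNat := by omega
    rw [h2] at h1
    refine ⟨h1, ?_⟩
    rw [h1]
    simp [List.length_take, List.length_drop]
    omega
  obtain ⟨hsub_eq, hsub_len⟩ := hslice nums rfl
  obtain ⟨htsub_eq, htsub_len⟩ := hslice _ htlen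
  set target := PySem.List.sorted nums (fun x => x) with htarget
  set sub := PySem.List.slice nums (some i) (some (i + k)) with hsubdef
  set t_sub := PySem.List.slice target (some i) (some (i + k)) with htsubdef
  have hpw : t_sub.Pairwise (· ≤ ·) := by
    have h1 : List.Pairwise (fun a b => a ≤ b) target := by
      simpa using PySem.List.sorted_pairwise nums (fun x => x)
    rw [htsub_eq]
    exact h1.sublist ((List.take_sublist _ _).trans (List.drop_sublist _ _))
  have hsubne : sub ≠ [] := by
    intro h
    rw [h] at hsub_len
    simp at hsub_len
    omega
  have hlen2 : sub.length = t_sub.length := by rw [hsub_len, htsub_len]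
  -- A's body as a proposition
  have hA : ((if PySem.List.sorted sub (fun x => x) ≠ t_sub then false
      else if ((PySem.List.pyRange 0 k 1).foldl (fun inf j =>
          if PySem.List.pyGetD sub j 0 > PySem.List.pyGetD sub (PySem.Int.mod (j + 1) k) 0
          then inf + 1 else inf) (0 : Int)) > 1 then false else true) = true)
      ↔ (PySem.List.sorted sub (fun x => x) = t_sub ∧ pvDesc sub + pvWrap sub ≤ 1) := by
    rw [pvInflFold sub k hk hsub_len]
    by_cases h1 : PySem.List.sorted sub (fun x => x) = t_sub
    · rw [if_neg (not_not_intro h1)]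
      by_cases h2 : pvDesc sub + pvWrap sub ≤ 1
      · rw [if_neg (by push_cast; omega)]
        simp [h1, h2]
      · rw [if_pos (by push_cast; omega)]
        simp [h2]
    · rw [if_pos h1]
      simp [h1]
  have hlp : 0 < sub.length := by
    rw [hsub_len]; omega
  set dsL := (PySem.List.pyRange 1 k 1).filter (fun j =>
    decide (PySem.List.pyGetD sub (j - 1) 0 > PySem.List.pyGetD sub j 0)) with hdsdef
  have hdlen : dsL.length = pvDesc sub := pvDsLen sub k hsub_len
  have hwin : ∀ rn : Nat, rn ≤ t_sub.length → ((t_sub ++ t_sub).drop rn).take sub.length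
      = t_sub.drop rn ++ t_sub.take rn := by
    intro rn h
    rw [hlen2]
    exact pv_window t_sub rn h
  -- B's body as a proposition
  have hB : ((if dsL.length > 1 then false
      else if dsL.isEmpty then sub == t_sub
      else
        sub == PySem.List.slice t_sub (some (k - PySem.List.pyGetD dsL 0 0)) none ++
               PySem.List.slice t_sub none (some (k - PySem.List.pyGetD dsL 0 0))) = true)
      ↔ (∃ rn : Nat, rn < sub.length ∧ ((t_sub ++ t_sub).drop rn).take sub.length = sub) := by
    match hd : pvDesc sub with
    | Nat.succ (Nat.succ m) =>
      rw [if_pos (by omega)]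
      constructor
      · intro h; cases h
      · rintro ⟨rn, hrn, hrot⟩
        exfalso
        have hrep : sub = t_sub.drop rn ++ t_sub.take rn := by rw [← hrot, hwin rn (by omega)]
        have : pvDesc sub ≤ 1 := by
          rw [hrep]
          exact pvDesc_append_le_one _ _ (hpw.sublist (List.drop_sublist _ _))
            (hpw.sublist (List.take_sublist _ _))
        omega
    | 0 =>
      have hsubpw : sub.Pairwise (· ≤ ·) := (pvDesc_eq_zero_iff sub).mp hd
      rw [if_neg (by omega), if_pos (by rw [List.isEmpty_iff, ← List.length_eq_zero_iff]; omega),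
          beq_iff_eq]
      constructor
      · intro he
        refine ⟨0, by omega, ?_⟩
        rw [hwin 0 (by omega)]
        simpa using he.symm
      · rintro ⟨rn, hrn, hrot⟩
        have hrep : sub = t_sub.drop rn ++ t_sub.take rn := by rw [← hrot, hwin rn (by omega)]
        have hperm : sub.Perm t_sub := by
          rw [hrep]
          have h := List.perm_append_comm (l₁ := t_sub.drop rn) (l₂ := t_sub.take rn)
          rwa [List.take_append_drop] at h
        have e1 : PySem.List.sorted t_sub (fun x => x) = sub :=
          PySem.List.sorted_id_eq_of_perm_of_pairwise t_sub sub hperm hsubpw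
        have e2 : PySem.List.sorted t_sub (fun x => x) = t_sub :=
          PySem.List.sorted_eq_self_of_pairwise t_sub (fun x => x) hpw
        rw [← e1]
        exact e2
    | 1 =>
      obtain ⟨p', hds1⟩ := List.length_eq_one_iff.mp (by omega : dsL.length = 1)
      have hp'mem : p' ∈ dsL := by rw [hds1]; exact List.mem_singleton.mpr rfl
      have hmem := List.mem_filter.mp hp'mem
      obtain ⟨hp1, hpk⟩ := PySem.List.mem_pyRange_one.mp hmem.1
      have hdescI : PySem.List.pyGetD sub p' 0 < PySem.List.pyGetD sub (p' - 1) 0 :=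
        of_decide_eq_true hmem.2
      have hpge : PySem.List.pyGetD dsL 0 0 = p' := by
        rw [hds1]
        exact PySem.List.pyGetD_zero_cons p' [] 0
      have hdescE : sub[p'.toNat]'(by omega) < sub[p'.toNat - 1]'(by omega) := by
        rw [PySem.List.pyGetD_eq_getElem sub 0 (by omega) (by omega),
            PySem.List.pyGetD_eq_getElem sub 0 (by omega) (by omega)] at hdescI
        simp only [show (p' - 1).toNat = p'.toNat - 1 from by omega] at hdescI
        exact hdescI
      rw [if_neg (by omega), if_neg (by rw [hds1]; simp), hpge,
          PySem.List.slice_from t_sub (by omega : (0:Int) ≤ k - p'),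
          PySem.List.slice_to t_sub (by omega : (0:Int) ≤ k - p'), beq_iff_eq]
      constructor
      · intro he
        refine ⟨(k - p').toNat, by omega, ?_⟩
        rw [hwin (k - p').toNat (by omega)]
        exact he.symm
      · rintro ⟨rn', hrn', hrot⟩
        have hrep : sub = t_sub.drop rn' ++ t_sub.take rn' := by rw [← hrot, hwin rn' (by omega)]
        rcases Nat.eq_zero_or_pos rn' with rfl | hr0
        · exfalso
          have he : sub = t_sub := by simpa using hrep
          have : pvDesc sub = 0 := (pvDesc_eq_zero_iff sub).mpr (he ▸ hpw)
          omega
        · have hlen3 : (t_sub.drop rn' ++ t_sub.take rn').length = t_sub.length := by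
            simp
            omega
          have g1 : sub[p'.toNat]'(by omega)
              = (t_sub.drop rn' ++ t_sub.take rn')[p'.toNat]'(by rw [hlen3]; omega) :=
            List.getElem_of_eq hrep _
          have g2 : sub[p'.toNat - 1]'(by omega)
              = (t_sub.drop rn' ++ t_sub.take rn')[p'.toNat - 1]'(by rw [hlen3]; omega) :=
            List.getElem_of_eq hrep _
          have hdescE' : (t_sub.drop rn' ++ t_sub.take rn')[p'.toNat]'(by rw [hlen3]; omega)
              < (t_sub.drop rn' ++ t_sub.take rn')[p'.toNat - 1]'(by rw [hlen3]; omega) := by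
            have h' := hdescE
            rw [g1, g2] at h'
            exact h'
          have hforced : p'.toNat = t_sub.length - rn' :=
            pvRotForced t_sub hpw rn' p'.toNat hr0 (by omega) (by omega) (by omega) hlen3 hdescE'
          have hrr : rn' = (k - p').toNat := by omega
          rw [hrep, hrr]
  have hunf : pvAltBlockOk nums target i k =
      (if dsL.length > 1 then false
       else if dsL.isEmpty then sub == t_sub
       else
         sub == PySem.List.slice t_sub (some (k - PySem.List.pyGetD dsL 0 0)) none ++
                PySem.List.slice t_sub none (some (k - PySem.List.pyGetD dsL 0 0))) := rfl
  refine Bool.coe_iff_coe.mp ?_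
  simp only []
  rw [hunf, hA, hB]
  exact pvBlockIff sub t_sub hpw hlen2 hsubne

theorem pvMain (nums : List Int) : sortableIntegers nums = sortableIntegers_alt nums := by
  simp only [sortableIntegers, sortableIntegers_alt]
  set n : Int := (nums.length : Int) with hn
  set target := PySem.List.sorted nums (fun x => x) with htg
  set pB : Int → Bool := fun k =>
    (PySem.Int.mod n k == 0) &&
      ((PySem.List.pyRange 0 n k).all (fun i => pvAltBlockOk nums target i k)) with hpB
  have hstep1 : ∀ k ∈ PySem.List.pyRange 1 (n + 1) 1, ∀ res : Int,
      (if PySem.Int.mod n k ≠ 0 then res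
       else
         if (PySem.List.pyRange 0 n k).foldl (fun valid i =>
            if valid then
              (if PySem.List.sorted (PySem.List.slice nums (some i) (some (i + k))) (fun x => x) ≠
                  PySem.List.slice target (some i) (some (i + k)) then false
               else
                 if ((PySem.List.pyRange 0 k 1).foldl (fun inf j =>
                     if PySem.List.pyGetD (PySem.List.slice nums (some i) (some (i + k))) j 0 >
                        PySem.List.pyGetD (PySem.List.slice nums (some i) (some (i + k)))
                          (PySem.Int.mod (j + 1) k) 0
                     then inf + 1 else inf) (0 : Int)) > 1 then false else true)
            else valid) true
         then res + k else res)
      = (if pB k then res + k else res) := by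
    intro k hk res
    have hk1 : 1 ≤ k := (PySem.List.mem_pyRange_one.mp hk).1
    by_cases hm : PySem.Int.mod n k = 0
    · have hdvd : k ∣ n := (PySem.Int.mod_eq_zero_iff_dvd n k).mp hm
      rw [if_neg (not_not_intro hm)]
      have hinner : (PySem.List.pyRange 0 n k).foldl (fun valid i =>
          if valid then
            (if PySem.List.sorted (PySem.List.slice nums (some i) (some (i + k))) (fun x => x) ≠
                PySem.List.slice target (some i) (some (i + k)) then false
             else
               if ((PySem.List.pyRange 0 k 1).foldl (fun inf j =>
                   if PySem.List.pyGetD (PySem.List.slice nums (some i) (some (i + k))) j 0 >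
                      PySem.List.pyGetD (PySem.List.slice nums (some i) (some (i + k)))
                        (PySem.Int.mod (j + 1) k) 0
                   then inf + 1 else inf) (0 : Int)) > 1 then false else true)
          else valid) true
          = (PySem.List.pyRange 0 n k).all (fun i => pvAltBlockOk nums target i k) := by
        rw [pvFoldlBreak]
        refine pvAllCongr _ _ _ ?_
        intro i hi
        obtain ⟨hi0, hiN, hidvd⟩ := (PySem.List.mem_pyRange_iff_of_pos (by omega) i).mp hi
        have := pvBodyEq nums k i (by omega) hdvd hi0 hiN (by simpa using hidvd)
        simpa using this
      rw [hinner, hpB]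
      beta_reduce
      rw [hm]
      rw [show ((0:Int) == 0) = true from rfl, Bool.true_and]
    · rw [if_pos hm, hpB]
      beta_reduce
      have hf : (PySem.Int.mod n k == 0) = false := by simp [hm]
      rw [hf, Bool.false_and]
      simp
  calc (PySem.List.pyRange 1 (n + 1) 1).foldl (fun res k =>
        if PySem.Int.mod n k ≠ 0 then res
        else
          if (PySem.List.pyRange 0 n k).foldl (fun valid i =>
              if valid then
                (if PySem.List.sorted (PySem.List.slice nums (some i) (some (i + k))) (fun x => x) ≠
                    PySem.List.slice target (some i) (some (i + k)) then false
                 else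
                   if ((PySem.List.pyRange 0 k 1).foldl (fun inf j =>
                       if PySem.List.pyGetD (PySem.List.slice nums (some i) (some (i + k))) j 0 >
                          PySem.List.pyGetD (PySem.List.slice nums (some i) (some (i + k)))
                            (PySem.Int.mod (j + 1) k) 0
                       then inf + 1 else inf) (0 : Int)) > 1 then false else true)
              else valid) true
          then res + k else res) 0
      = (PySem.List.pyRange 1 (n + 1) 1).foldl (fun res k => if pB k then res + k else res) 0 := by
        refine PySem.List.foldl_congr_mem' _ _ _ _ ?_
        intro k hk acc
        exact hstep1 k hk acc
    _ = (PySem.List.pyRange 1 (n + 1) 1).foldl (fun res k => res + (if pB k then k else 0)) 0 := by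
        refine PySem.List.foldl_congr_mem' _ _ _ _ ?_
        intro k _ acc
        split <;> simp
    _ = ((PySem.List.pyRange 1 (n + 1) 1).filter pB).sum := by
        rw [PySem.List.foldl_add, pv_sum_filter, zero_add]


-- ===== VERDICT (by name: the statement is the Claim_ definition above) =====
theorem sortableIntegers_spec : Claim_equal_sortableIntegers := by
  intro nums _
  unfold Spec_sortableIntegers
  exact pvMain nums
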